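-- pv_equiv track=rewrite | github.com/XiaoYouChR/Ghost-Downloader | app/Download_Engine.py | __increase_ranges_slice
-- ===== SOURCE A (Python) =====
-- def __increase_ranges_slice(ranges: list, minimum_size=1024 * 1024):
--     """增加分块数目，小于 minimum_size 就不再分割了"""
--     assert len(ranges) > 0
--     block_size = [end - start + 1 for start, end in ranges]
--     index_of_max = block_size.index(max(block_size))
--     start, end = ranges[index_of_max]
--     halfsize = block_size[index_of_max] // 2
--     if halfsize >= minimum_size:
--         new_ranges = [x for i, x in enumerate(ranges) if i != index_of_max]
--         new_ranges.append((start, start + halfsize))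
--         new_ranges.append((start + halfsize + 1, end))
--     else:
--         new_ranges = ranges
--     return new_ranges
-- ===== SOURCE B (Python) =====
-- def __extract_largest(rs):
--     """Tournament (divide and conquer): split in half, extract the first-largest
--     block from each half, let the halves compete ('>=' so the left/earlier half
--     wins ties). Returns (largest block, remaining blocks in original order)."""
--     if len(rs) == 1:
--         return rs[0], []
--     mid = len(rs) // 2
--     left, right = rs[:mid], rs[mid:]
--     lbest, lrest = __extract_largest(left)
--     rbest, rrest = __extract_largest(right)
--     if lbest[1] - lbest[0] >= rbest[1] - rbest[0]:
--         return lbest, lrest + right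
--     return rbest, left + rrest
--
--
-- def __increase_ranges_slice(ranges: list, minimum_size=1024 * 1024):
--     """增加分块数目，小于 minimum_size 就不再分割了"""
--     assert len(ranges) > 0
--     (start, end), others = __extract_largest(ranges)
--     halfsize = (end - start + 1) // 2
--     if halfsize >= minimum_size:
--         return others + [(start, start + halfsize), (start + halfsize + 1, end)]
--     return ranges
-- ===== Notes on version B (the rewrite author's own statement) =====
-- stated objective: alternative
-- what changed: Replaces A's staged passes (size list, max(), .index(), enumerate-filter) by a divide-and-conquer tournament: recursively split the list in half, extract the first-largest block and the leftover blocks from each half, and let the halves compete with '>=' so the earlier half keeps ties.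
import Mathlib
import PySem

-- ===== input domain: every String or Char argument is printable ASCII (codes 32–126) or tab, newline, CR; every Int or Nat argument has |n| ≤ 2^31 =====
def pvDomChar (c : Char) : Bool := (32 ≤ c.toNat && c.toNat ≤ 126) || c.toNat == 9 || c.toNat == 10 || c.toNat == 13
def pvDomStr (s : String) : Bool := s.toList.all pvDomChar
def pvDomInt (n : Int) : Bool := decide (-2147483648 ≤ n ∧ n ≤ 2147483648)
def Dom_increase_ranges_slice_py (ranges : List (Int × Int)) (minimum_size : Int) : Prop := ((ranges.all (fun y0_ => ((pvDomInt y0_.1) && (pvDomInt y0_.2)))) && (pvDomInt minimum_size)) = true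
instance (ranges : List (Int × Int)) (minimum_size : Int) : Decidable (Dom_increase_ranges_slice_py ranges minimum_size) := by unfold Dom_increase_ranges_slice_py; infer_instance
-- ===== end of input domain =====

-- One line: B replaces A's size list + max + .index + enumerate-filter by a divide-and-conquer
-- tournament that extracts the first-largest block and the leftover blocks; same return value.

-- ===== PORT A =====
-- literal transliteration of __increase_ranges_slice (Source A)
def increase_ranges_slice_py (ranges : List (Int × Int)) (minimum_size : Int) : List (Int × Int) :=
  match ranges with
  | [] => []  -- assert len(ranges) > 0 fails: excluded by Pre_
  | _ :: _ =>
    let block_size := ranges.map (fun p => p.2 - p.1 + 1)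
    match PySem.List.max? block_size (fun x => x) with
    | none => []
    | some m =>
      match PySem.List.index? block_size m with
      | none => []
      | some index_of_max =>
        match PySem.List.pyGet? ranges (index_of_max : Int) with
        | none => []
        | some (start, end_) =>
          match PySem.List.pyGet? block_size (index_of_max : Int) with
          | none => []
          | some bs =>
            let halfsize := PySem.Int.floordiv bs 2
            if halfsize ≥ minimum_size then
              ((PySem.List.enumerate ranges 0).filter (fun p => p.1 != (index_of_max : Int))).map (·.2)
                ++ [(start, start + halfsize), (start + halfsize + 1, end_)]
            else ranges

-- ===== PORT B =====
-- Source B's __extract_largest: tournament — split in half, extract from each half, '>=' keeps the earlier half on ties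
def pvExtract : List (Int × Int) → (Int × Int) × List (Int × Int)
  | [] => ((0, 0), [])  -- unreachable: callers pass nonempty lists
  | [x] => (x, [])
  | x :: y :: t =>
    let rs := x :: y :: t
    let mid := rs.length / 2
    let left := rs.take mid
    let right := rs.drop mid
    let lres := pvExtract left
    let rres := pvExtract right
    if lres.1.2 - lres.1.1 ≥ rres.1.2 - rres.1.1 then (lres.1, lres.2 ++ right)
    else (rres.1, left ++ rres.2)
termination_by rs => rs.length
decreasing_by
  · simp; omega
  · simp; omega

def increase_ranges_slice_py_alt (ranges : List (Int × Int)) (minimum_size : Int) : List (Int × Int) :=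
  match ranges with
  | [] => []  -- assert len(ranges) > 0 fails: excluded by Pre_
  | _ :: _ =>
    let be := pvExtract ranges
    let start := be.1.1
    let end_ := be.1.2
    let others := be.2
    let halfsize := PySem.Int.floordiv (end_ - start + 1) 2
    if halfsize ≥ minimum_size then
      others ++ [(start, start + halfsize), (start + halfsize + 1, end_)]
    else ranges

-- ===== PRECONDITION & SPEC =====
-- Pre_ excludes only the empty list, on which A's 'assert len(ranges) > 0' raises AssertionError.
def Pre_increase_ranges_slice_py (ranges : List (Int × Int)) (minimum_size : Int) : Prop := ranges ≠ []
instance (ranges : List (Int × Int)) (minimum_size : Int) : Decidable (Pre_increase_ranges_slice_py ranges minimum_size) := by unfold Pre_increase_ranges_slice_py; infer_instance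

def pvWitness_increase_ranges_slice_py : (List (Int × Int)) × Int := ([(0, 9), (0, 3)], 1)

def Spec_increase_ranges_slice_py (ranges : List (Int × Int)) (minimum_size : Int) (out : List (Int × Int)) : Prop := out = increase_ranges_slice_py_alt ranges minimum_size
instance (ranges : List (Int × Int)) (minimum_size : Int) (out : List (Int × Int)) : Decidable (Spec_increase_ranges_slice_py ranges minimum_size out) := by unfold Spec_increase_ranges_slice_py; infer_instance

-- ===== CLAIM (what is proved, stated in full; the proofs are below) =====
def Claim_equal_increase_ranges_slice_py : Prop := ∀ (ranges : List (Int × Int)) (minimum_size : Int), Dom_increase_ranges_slice_py ranges minimum_size → Pre_increase_ranges_slice_py ranges minimum_size → Spec_increase_ranges_slice_py ranges minimum_size (increase_ranges_slice_py ranges minimum_size)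

-- ===== LEMMAS AND PROOFS =====

-- block size of a range pair
def pvSz (p : Int × Int) : Int := p.2 - p.1 + 1

-- the tournament returns the first block of maximal size together with the other blocks in order
-- gluing a dropped prefix of a take back onto the tail drop
theorem pvDropGlue {α : Type} (l : List α) (m n : Nat) (h : m ≤ n) :
    (l.take n).drop m ++ l.drop n = l.drop m := by
  rw [List.drop_take]
  have h2 : l.drop n = (l.drop m).drop (n - m) := by rw [List.drop_drop]; congr 1; omega
  rw [h2, List.take_append_drop]

theorem pvExtract_spec (rs : List (Int × Int)) (hne : rs ≠ []) :
    ∃ (j : Nat) (hj : j < rs.length),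
      pvExtract rs = (rs[j]'hj, rs.take j ++ rs.drop (j + 1)) ∧
      (∀ p ∈ rs, pvSz p ≤ pvSz (rs[j]'hj)) ∧
      (∀ k (hk : k < rs.length), k < j → pvSz (rs[k]'hk) < pvSz (rs[j]'hj)) := by
  match rs with
  | [] => exact absurd rfl hne
  | [x] =>
    refine ⟨0, by simp, by simp [pvExtract], ?_, ?_⟩
    · intro p hp; simp at hp; simp [hp]
    · intro k hk hk0; omega
  | x :: y :: t =>
    have hlen : 2 ≤ (x :: y :: t).length := by simp
    have hmid1 : 1 ≤ (x :: y :: t).length / 2 := by omega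
    have hmidlt : (x :: y :: t).length / 2 < (x :: y :: t).length := by omega
    have hlne : (x :: y :: t).take ((x :: y :: t).length / 2) ≠ [] :=
      List.ne_nil_of_length_pos (by rw [List.length_take]; omega)
    have hrne : (x :: y :: t).drop ((x :: y :: t).length / 2) ≠ [] :=
      List.ne_nil_of_length_pos (by rw [List.length_drop]; omega)
    obtain ⟨jl, hjl, heql, hml, hsl⟩ :=
      pvExtract_spec ((x :: y :: t).take ((x :: y :: t).length / 2)) hlne
    obtain ⟨jr, hjr, heqr, hmr, hsr⟩ :=
      pvExtract_spec ((x :: y :: t).drop ((x :: y :: t).length / 2)) hrne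
    have hjl' : jl < (x :: y :: t).length / 2 := by
      have h2 := hjl; rw [List.length_take] at h2; omega
    have hjr' : jr < (x :: y :: t).length - (x :: y :: t).length / 2 := by
      have h2 := hjr; rw [List.length_drop] at h2; omega
    have hsplit : (x :: y :: t).take ((x :: y :: t).length / 2)
        ++ (x :: y :: t).drop ((x :: y :: t).length / 2) = x :: y :: t :=
      List.take_append_drop _ _
    rw [pvExtract, heql, heqr]
    simp only []
    split_ifs with hcond
    · -- left wins ('>=' keeps the earlier half on ties)
      have hjlt : jl < (x :: y :: t).length := by omega
      have hgl : ((x :: y :: t).take ((x :: y :: t).length / 2))[jl]'hjl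
          = (x :: y :: t)[jl]'hjlt := List.getElem_take
      refine ⟨jl, hjlt, ?_, ?_, ?_⟩
      · rw [hgl]
        congr 1
        rw [List.take_take, Nat.min_eq_left (by omega)]
        rw [List.append_assoc, pvDropGlue _ (jl + 1) _ (by omega)]
      · intro p hp
        rw [hgl] at hml
        rw [← hsplit] at hp
        rcases List.mem_append.1 hp with hp | hp
        · exact hml p hp
        · have h1 := hmr p hp
          have h2 : pvSz (((x :: y :: t).drop ((x :: y :: t).length / 2))[jr]'hjr)
              ≤ pvSz ((x :: y :: t)[jl]'hjlt) := by
            rw [← hgl]; simp only [pvSz] at hcond ⊢; omega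
          exact le_trans h1 h2
      · intro k hk hkj
        have hkm : k < (x :: y :: t).length / 2 := by omega
        have hgk : ((x :: y :: t).take ((x :: y :: t).length / 2))[k]'(by
            rw [List.length_take]; omega) = (x :: y :: t)[k]'hk := List.getElem_take
        have := hsl k (by rw [List.length_take]; omega) hkj
        rw [hgk, hgl] at this
        exact this
    · -- right wins strictly
      have hjlt : (x :: y :: t).length / 2 + jr < (x :: y :: t).length := by omega
      have hgr : ((x :: y :: t).drop ((x :: y :: t).length / 2))[jr]'hjr
          = (x :: y :: t)[(x :: y :: t).length / 2 + jr]'hjlt := List.getElem_drop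
      have hcond' : pvSz (((x :: y :: t).take ((x :: y :: t).length / 2))[jl]'hjl)
          < pvSz (((x :: y :: t).drop ((x :: y :: t).length / 2))[jr]'hjr) := by
        simp only [pvSz]; omega
      refine ⟨(x :: y :: t).length / 2 + jr, hjlt, ?_, ?_, ?_⟩
      · rw [hgr]
        congr 1
        rw [List.take_add, List.drop_drop, ← List.append_assoc, Nat.add_assoc]
      · intro p hp
        rw [hgr] at hmr hcond'
        rw [← hsplit] at hp
        rcases List.mem_append.1 hp with hp | hp
        · exact le_trans (hml p hp) (le_of_lt hcond')
        · exact hmr p hp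
      · intro k hk hkj
        rw [hgr] at hcond' 
        by_cases hkm : k < (x :: y :: t).length / 2
        · have hgk : ((x :: y :: t).take ((x :: y :: t).length / 2))[k]'(by
              rw [List.length_take]; omega) = (x :: y :: t)[k]'hk := List.getElem_take
          have h1 := hml _ (List.getElem_mem (l := (x :: y :: t).take ((x :: y :: t).length / 2))
            (n := k) (by rw [List.length_take]; omega))
          rw [hgk] at h1
          exact lt_of_le_of_lt h1 hcond'
        · have hk2 : k - (x :: y :: t).length / 2 < ((x :: y :: t).drop ((x :: y :: t).length / 2)).length := by
            rw [List.length_drop]; omega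
          have hgk : ((x :: y :: t).drop ((x :: y :: t).length / 2))[k - (x :: y :: t).length / 2]'hk2
              = (x :: y :: t)[k]'hk := by
            rw [List.getElem_drop]; congr 1; omega
          have := hsr (k - (x :: y :: t).length / 2) hk2 (by omega)
          rw [hgk, hgr] at this
          exact this
termination_by rs.length
decreasing_by
  · simp [List.length_take]; omega
  · simp; omega

-- dropping index k from enumerate-filter equals take k ++ drop (k+1)
theorem pvFilter_enumerate {α : Type} (xs : List α) (k : Nat) (s : Int) :
    ((PySem.List.enumerate xs s).filter (fun p => p.1 != (s + k))).map (·.2)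
      = xs.take k ++ xs.drop (k + 1) := by
  induction xs generalizing k s with
  | nil => simp [PySem.List.enumerate_nil]
  | cons x xs ih =>
    rw [PySem.List.enumerate_cons]
    cases k with
    | zero =>
      simp only [List.filter_cons]
      rw [if_neg (by simp)]
      rw [List.filter_eq_self.2 (by
        intro p hp
        obtain ⟨k, hk, rfl⟩ := (PySem.List.mem_enumerate_iff xs (s + 1) p).1 hp
        simp; omega)]
      simp [PySem.List.map_snd_enumerate]
    | succ k' =>
      simp only [List.filter_cons]
      rw [if_pos (by simp; omega)]
      have hre : s + (((k' : Int)) + 1) = (s + 1) + (k' : Int) := by ring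
      simp only [Nat.cast_add, Nat.cast_one, hre, List.map_cons]
      rw [ih k' (s + 1)]
      simp

-- ===== VERDICT (by name: the statement is the Claim_ definition above) =====
theorem increase_ranges_slice_py_spec : Claim_equal_increase_ranges_slice_py := by
  intro ranges minimum_size _ hpre
  unfold Spec_increase_ranges_slice_py
  match hrs : ranges with
  | [] => exact absurd rfl hpre
  | (s0, e0) :: rest =>
    cases hmax : PySem.List.max? (((s0, e0) :: rest).map (fun p => p.2 - p.1 + 1)) (fun x => x) with
    | none =>
      have := (PySem.List.max?_eq_none_iff _ _).1 hmax
      simp at this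
    | some m =>
      have hle : ∀ y ∈ ((s0, e0) :: rest).map (fun p => p.2 - p.1 + 1), y ≤ m := by
        have := PySem.List.max?_isMax hmax
        simpa using this
      have hmem : m ∈ ((s0, e0) :: rest).map (fun p => p.2 - p.1 + 1) :=
        PySem.List.max?_mem hmax
      cases hidx : PySem.List.index? (((s0, e0) :: rest).map (fun p => p.2 - p.1 + 1)) m with
      | none => exact absurd hmem ((PySem.List.index?_eq_none_iff _ _).1 hidx)
      | some idx =>
        obtain ⟨hkl, hget, hfst⟩ := PySem.List.getElem_of_index?_eq_some hidx
        have hkl' : idx < ((s0, e0) :: rest).length := by simpa using hkl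
        obtain ⟨j, hj, heq, hmaxp, hstr⟩ := pvExtract_spec ((s0, e0) :: rest) (by simp)
        -- the winning block's size is m
        have hszidx : pvSz ((((s0, e0) :: rest))[idx]'hkl') = m := by
          have := hget; simp only [List.getElem_map] at this
          simpa [pvSz] using this
        have hszj : pvSz ((((s0, e0) :: rest))[j]'hj) = m := by
          have h1 : pvSz ((((s0, e0) :: rest))[j]'hj) ≤ m :=
            hle _ (List.mem_map.2 ⟨_, List.getElem_mem _, rfl⟩)
          have h2 := hmaxp _ (List.getElem_mem hkl')
          omega
        -- hence the tournament lands on A's index_of_max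
        have hji : idx = j := by
          rcases Nat.lt_trichotomy j idx with h | h | h
          · have hne := hfst j h
            exact absurd (by simp only [List.getElem_map]; simpa [pvSz] using hszj) hne
          · exact h.symm
          · have := hstr idx hkl' h
            omega
        obtain rfl : idx = j := hji
        have hg1 : PySem.List.pyGet? ((s0, e0) :: rest) (idx : Int)
            = some (((s0, e0) :: rest)[idx]'hkl') := by
          rw [PySem.List.pyGet?_natCast]; exact List.getElem?_eq_getElem hkl'
        have hg2 : PySem.List.pyGet? (((s0, e0) :: rest).map (fun p => p.2 - p.1 + 1)) (idx : Int)
            = some m := by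
          rw [PySem.List.pyGet?_natCast]
          rw [List.getElem?_eq_getElem hkl]
          exact congrArg some hget
        -- evaluate both ports
        simp only [increase_ranges_slice_py, increase_ranges_slice_py_alt, hmax, hidx, hg1, hg2, heq]
        have hbs : (((s0, e0) :: rest)[idx]'hkl').2 - (((s0, e0) :: rest)[idx]'hkl').1 + 1 = m := by
          simpa [pvSz] using hszidx
        rw [hbs]
        split_ifs with hcond
        · have hfe := pvFilter_enumerate (α := Int × Int) ((s0, e0) :: rest) idx 0
          simp only [zero_add] at hfe
          rw [hfe]
          simp [List.append_assoc]
        · rfl
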